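-- pv_equiv track=rewrite | github.com/An0ther0ne/PyFire | fireg.py | igniinitline
-- ===== SOURCE A (Python) =====
-- screen_color = (32,0,0)
--
-- def igniinitline(line):
-- 	mline = []
-- 	(r2,g2,b2) = screen_color
-- 	for c1 in line:
-- 		r1,g1,b1 = c1 >> 16, (c1 >> 8) & 0xFF, c1 & 0xFF
-- 		r1 = (r1 + r2 + screen_color[0]) // 3
-- 		g1 = (g1 + g2 + screen_color[1]) // 3
-- 		b1 = (b1 + b2 + screen_color[2]) // 3
-- 		r2,g2,b2 = r1,g1,b1
-- 		mline.append((r1,g1,b1))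
-- 	return mline
-- ===== SOURCE B (Python) =====
-- screen_color = (32,0,0)
--
-- def igniinitline(line):
--     # Three independent per-channel scans over extracted channel lists, zipped into triples.
--     def chan_scan(xs, s):
--         out = []
--         prev = s
--         for x in xs:
--             prev = (x + prev + s) // 3
--             out.append(prev)
--         return out
--     rs = chan_scan([c >> 16 for c in line], screen_color[0])
--     gs = chan_scan([(c >> 8) & 0xFF for c in line], screen_color[1])
--     bs = chan_scan([c & 0xFF for c in line], screen_color[2])
--     return list(zip(rs, gs, bs))
-- ===== Notes on version B (the rewrite author's own statement) =====
-- stated objective: alternative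
-- what changed: B splits the blend into three independent per-channel scans over extracted channel lists and zips the results into triples, instead of A's single loop threading a combined (r,g,b) state.
import Mathlib
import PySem

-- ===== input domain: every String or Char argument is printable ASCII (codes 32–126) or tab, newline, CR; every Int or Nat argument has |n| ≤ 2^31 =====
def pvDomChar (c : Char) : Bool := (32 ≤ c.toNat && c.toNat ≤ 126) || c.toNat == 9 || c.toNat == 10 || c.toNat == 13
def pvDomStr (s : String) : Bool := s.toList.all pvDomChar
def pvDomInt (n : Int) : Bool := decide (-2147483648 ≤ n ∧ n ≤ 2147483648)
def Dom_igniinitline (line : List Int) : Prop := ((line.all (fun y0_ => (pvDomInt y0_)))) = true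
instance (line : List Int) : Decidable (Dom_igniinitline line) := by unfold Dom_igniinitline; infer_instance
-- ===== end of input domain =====

-- B replaces A's single loop threading a combined (r,g,b) state by three independent
-- per-channel scans over extracted channel lists, zipped into triples (alternative decomposition).

-- ===== PORT A =====
def igniinitline (line : List Int) : List (Int × Int × Int) :=
  (line.foldl
    (fun (st : List (Int × Int × Int) × Int × Int × Int) c1 =>
      let mline := st.1
      let r2 := st.2.1
      let g2 := st.2.2.1
      let b2 := st.2.2.2
      let r1 := PySem.Int.floordiv (PySem.Int.floordiv c1 65536 + r2 + 32) 3
      let g1 := PySem.Int.floordiv (PySem.Int.mod (PySem.Int.floordiv c1 256) 256 + g2 + 0) 3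
      let b1 := PySem.Int.floordiv (PySem.Int.mod c1 256 + b2 + 0) 3
      (mline ++ [(r1, g1, b1)], r1, g1, b1))
    ([], 32, 0, 0)).1

-- ===== PORT B =====
def chanScan (xs : List Int) (s : Int) : List Int :=
  (xs.foldl
    (fun (st : List Int × Int) x =>
      let prev := PySem.Int.floordiv (x + st.2 + s) 3
      (st.1 ++ [prev], prev))
    ([], s)).1

def igniinitline_alt (line : List Int) : List (Int × Int × Int) :=
  let rs := chanScan (line.map (fun c => PySem.Int.floordiv c 65536)) 32
  let gs := chanScan (line.map (fun c => PySem.Int.mod (PySem.Int.floordiv c 256) 256)) 0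
  let bs := chanScan (line.map (fun c => PySem.Int.mod c 256)) 0
  List.zip rs (List.zip gs bs)

-- ===== PRECONDITION & SPEC =====
def Spec_igniinitline (line : List Int) (out : List (Int × Int × Int)) : Prop := out = igniinitline_alt line
instance (line : List Int) (out : List (Int × Int × Int)) : Decidable (Spec_igniinitline line out) := by unfold Spec_igniinitline; infer_instance

-- ===== CLAIM (what is proved, stated in full; the proofs are below) =====
def Claim_equal_igniinitline : Prop := ∀ (line : List Int), Dom_igniinitline line → Spec_igniinitline line (igniinitline line)

-- ===== LEMMAS AND PROOFS =====

-- Proof-only clean scans for both sides.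
def scanC (s : Int) : List Int → Int → List Int
  | [], _ => []
  | x :: xs, p =>
    PySem.Int.floordiv (x + p + s) 3 :: scanC s xs (PySem.Int.floordiv (x + p + s) 3)

def scan3 : List Int → Int → Int → Int → List (Int × Int × Int)
  | [], _, _, _ => []
  | c :: cs, r, g, b =>
    (PySem.Int.floordiv (PySem.Int.floordiv c 65536 + r + 32) 3,
     PySem.Int.floordiv (PySem.Int.mod (PySem.Int.floordiv c 256) 256 + g + 0) 3,
     PySem.Int.floordiv (PySem.Int.mod c 256 + b + 0) 3) ::
    scan3 cs (PySem.Int.floordiv (PySem.Int.floordiv c 65536 + r + 32) 3)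
            (PySem.Int.floordiv (PySem.Int.mod (PySem.Int.floordiv c 256) 256 + g + 0) 3)
            (PySem.Int.floordiv (PySem.Int.mod c 256 + b + 0) 3)

theorem chanScan_fold (s : Int) : ∀ (xs : List Int) (m : List Int) (p : Int),
    (xs.foldl
      (fun (st : List Int × Int) x =>
        let prev := PySem.Int.floordiv (x + st.2 + s) 3
        (st.1 ++ [prev], prev))
      (m, p)).1 = m ++ scanC s xs p := by
  intro xs
  induction xs with
  | nil => intro m p; simp [scanC]
  | cons x xs ih =>
    intro m p
    simp only [List.foldl_cons, scanC]
    rw [ih]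
    simp only [List.append_assoc, List.cons_append, List.nil_append]

theorem foldA_scan3 : ∀ (xs : List Int) (m : List (Int × Int × Int)) (r g b : Int),
    (xs.foldl
      (fun (st : List (Int × Int × Int) × Int × Int × Int) c1 =>
        let mline := st.1
        let r2 := st.2.1
        let g2 := st.2.2.1
        let b2 := st.2.2.2
        let r1 := PySem.Int.floordiv (PySem.Int.floordiv c1 65536 + r2 + 32) 3
        let g1 := PySem.Int.floordiv (PySem.Int.mod (PySem.Int.floordiv c1 256) 256 + g2 + 0) 3
        let b1 := PySem.Int.floordiv (PySem.Int.mod c1 256 + b2 + 0) 3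
        (mline ++ [(r1, g1, b1)], r1, g1, b1))
      (m, r, g, b)).1 = m ++ scan3 xs r g b := by
  intro xs
  induction xs with
  | nil => intro m r g b; simp [scan3]
  | cons c cs ih =>
    intro m r g b
    simp only [List.foldl_cons, scan3]
    rw [ih]
    simp only [List.append_assoc, List.cons_append, List.nil_append]

theorem zip_scanC_scan3 : ∀ (xs : List Int) (r g b : Int),
    List.zip (scanC 32 (xs.map (fun c => PySem.Int.floordiv c 65536)) r)
      (List.zip (scanC 0 (xs.map (fun c => PySem.Int.mod (PySem.Int.floordiv c 256) 256)) g)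
                (scanC 0 (xs.map (fun c => PySem.Int.mod c 256)) b)) = scan3 xs r g b := by
  intro xs
  induction xs with
  | nil => intro r g b; simp [scanC, scan3]
  | cons c cs ih =>
    intro r g b
    simp only [List.map_cons, scanC, scan3, List.zip_cons_cons]
    rw [ih]

-- ===== VERDICT (by name: the statement is the Claim_ definition above) =====
theorem igniinitline_spec : Claim_equal_igniinitline := by
  intro line _
  show igniinitline line = igniinitline_alt line
  unfold igniinitline igniinitline_alt chanScan
  rw [foldA_scan3, chanScan_fold, chanScan_fold, chanScan_fold]
  simp only [List.nil_append]
  rw [zip_scanC_scan3]
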